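-- pv_equiv track=rewrite | github.com/snehapr/Advent-of-Code-2025 | advent_of_code/day_6_q2.py | parse_worksheet
-- ===== SOURCE A (Python) =====
-- def parse_worksheet(lines):
--     maxlen = max(len(line) for line in lines)
--     lines = [line.rstrip('\n').ljust(maxlen) for line in lines]
--     cols = list(zip(*[list(line) for line in lines]))
--     cols = cols[::-1]
--     problems = []
--     current_problem = []
--     for col in cols:
--         if all(c == ' ' for c in col):
--             if current_problem:
--                 problems.append(current_problem)
--                 current_problem = []
--         else:
--             current_problem.append(col)
--     if current_problem:
--         problems.append(current_problem)
--     return problems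
-- ===== SOURCE B (Python) =====
-- def parse_worksheet(lines):
--     width = max(len(line) for line in lines)
--     rows = [line.rstrip('\n') for line in lines]
--
--     def char_at(r, j):
--         return r[j] if j < len(r) else ' '
--
--     def is_sep(j):
--         return all(char_at(r, j) == ' ' for r in rows)
--
--     problems = []
--     j = width - 1
--     while j >= 0:
--         if is_sep(j):
--             j -= 1
--         else:
--             k = j
--             while k >= 0 and not is_sep(k):
--                 k -= 1
--             problems.append([tuple(char_at(r, t) for r in rows) for t in range(j, k, -1)])
--             j = k
--     return problems
-- ===== Notes on version B (the rewrite author's own statement) =====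
-- stated objective: alternative
-- what changed: B never materialises the transpose: instead of zip(*rows), reversing, and an accumulator-flush loop, it walks column indices from right to left with a two-pointer scan (is_sep(j) reads the rows on demand), extracting each maximal non-separator run as one slice of indices and building only those columns.
import Mathlib
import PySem

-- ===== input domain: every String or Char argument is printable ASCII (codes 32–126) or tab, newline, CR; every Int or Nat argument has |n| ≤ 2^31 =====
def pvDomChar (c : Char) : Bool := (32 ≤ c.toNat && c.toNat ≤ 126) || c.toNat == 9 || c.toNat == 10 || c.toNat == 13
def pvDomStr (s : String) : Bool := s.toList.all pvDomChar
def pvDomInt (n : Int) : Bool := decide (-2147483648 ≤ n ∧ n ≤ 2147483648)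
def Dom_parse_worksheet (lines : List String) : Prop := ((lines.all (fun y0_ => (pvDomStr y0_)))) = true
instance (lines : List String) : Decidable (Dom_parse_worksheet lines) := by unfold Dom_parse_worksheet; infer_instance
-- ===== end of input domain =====

-- B never builds the transpose: instead of A's zip/reverse/accumulator-flush loop it walks
-- column indices right-to-left with a two-pointer scan, building only the non-separator columns;
-- same return value (return value only; neither version mutates its argument).

-- ===== PORT A =====
-- a char as the 1-character string Python's iteration over a str yields
def pvCharStr (c : Char) : String := String.ofList [c]
-- line.rstrip('\n'): drop trailing '\n' characters (exact hand port: rstrip with an explicit char set)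
def pvRstripNL (cs : List Char) : List Char := (cs.reverse.dropWhile (fun c => c = '\n')).reverse
-- s.ljust(n): right-pad with spaces, never truncates (exact: Nat subtraction clamps at 0 like ljust's no-op)
def pvLjust (cs : List Char) (n : Nat) : List Char := cs ++ List.replicate (n - cs.length) ' '

theorem pvZipStar_termination (rows : List (List Char)) (h : ¬(rows = [] ∨ rows.any List.isEmpty = true)) :
    ((rows.map List.tail).map List.length).sum < (rows.map List.length).sum := by
  rw [not_or] at h
  obtain ⟨hne, hall⟩ := h
  rw [Bool.not_eq_true, List.any_eq_false] at hall
  induction rows with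
  | nil => exact absurd rfl hne
  | cons r rs ih =>
    have hallr := hall r (List.mem_cons_self ..)
    have hr : r ≠ [] := by
      cases r with
      | nil => simp at hallr
      | cons a as => exact List.cons_ne_nil a as
    cases rs with
    | nil =>
      simp only [List.map_cons, List.map_nil, List.sum_cons, List.sum_nil]
      have := List.length_pos_of_ne_nil hr
      have : r.tail.length < r.length := by
        cases r with
        | nil => exact absurd rfl hr
        | cons a as => simp
      omega
    | cons s ss =>
      have hrec := ih (List.cons_ne_nil s ss) (fun x hx => hall x (List.mem_cons_of_mem _ hx))
      simp only [List.map_cons, List.sum_cons] at hrec ⊢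
      have : r.tail.length < r.length := by
        cases r with
        | nil => exact absurd rfl hr
        | cons a as => simp
      omega

-- zip(*rows): truncate at the shortest row; heads then tails (exact port of the builtin zip)
def pvZipStar (rows : List (List Char)) : List (List Char) :=
  if h : rows = [] ∨ rows.any List.isEmpty then []
  else (rows.map (fun r => r.headI)) :: pvZipStar (rows.map List.tail)
termination_by (rows.map List.length).sum
decreasing_by simpa using pvZipStar_termination rows h

-- A's preamble: maxlen, rstrip+ljust, transpose, reversal (chars as 1-char strings)
def pvCols (lines : List String) : List (List String) :=
  let maxlen := (lines.map (fun l => l.toList.length)).foldl max 0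
  let rows := lines.map (fun l => pvLjust (pvRstripNL l.toList) maxlen)
  ((pvZipStar rows).map (fun col => col.map pvCharStr)).reverse

-- the body of A's for-loop (state = (problems, current_problem))
def pvStepA (st : List (List (List String)) × List (List String)) (col : List String) :
    List (List (List String)) × List (List String) :=
  if col.all (fun c => c == " ") then
    (if st.2.isEmpty then st else (st.1 ++ [st.2], []))
  else (st.1, st.2 ++ [col])

def parse_worksheet (lines : List String) : List (List (List String)) :=
  let cols := pvCols lines
  let st := cols.foldl pvStepA ([], [])
  if st.2.isEmpty then st.1 else st.1 ++ [st.2]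

-- ===== PORT B =====
-- line.rstrip('\n') (same builtin as in A's preamble, ported for B's rows)
def bStrip (cs : List Char) : List Char := (cs.reverse.dropWhile (fun c => c = '\n')).reverse
-- char_at(r, j): r[j] as a 1-char string when j < len(r), else a space
def bCharAt (r : List Char) (j : Nat) : String :=
  if j < r.length then String.ofList [r.getD j ' '] else " "
-- is_sep(j): column j of the worksheet is all spaces (read from the rows on demand)
def bIsSep (rows : List (List Char)) (j : Nat) : Bool :=
  rows.all (fun r => bCharAt r j == " ")
-- the inner while loop 'k = j; while k >= 0 and not is_sep(k): k -= 1'; the argument and the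
-- result are k+1 (so 0 encodes Python's k = -1)
def bFindK (rows : List (List Char)) : Nat → Nat
  | 0 => 0
  | j+1 => if bIsSep rows j then j+1 else bFindK rows j

theorem bFindK_le (rows : List (List Char)) : ∀ m, bFindK rows m ≤ m := by
  intro m
  induction m with
  | zero => simp [bFindK]
  | succ j ih =>
    rw [bFindK]
    split
    · exact le_refl _
    · omega

-- one worksheet column, built on demand: [char_at(r, t) for r in rows]
def bColumn (rows : List (List Char)) (t : Nat) : List String :=
  rows.map (fun r => bCharAt r t)
-- one problem: the columns at indices range(j, k, -1), i.e. j down to k+1 = k1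
def bGroup (rows : List (List Char)) (j k1 : Nat) : List (List String) :=
  (PySem.List.pyRange (j : Int) ((k1 : Int) - 1) (-1)).map (fun t => bColumn rows t.toNat)
-- the outer while loop over the column index; the argument is j+1 (0 encodes j = -1)
def bScan (rows : List (List Char)) : Nat → List (List (List String)) → List (List (List String))
  | 0, acc => acc
  | j+1, acc =>
    if bIsSep rows j then bScan rows j acc
    else bScan rows (bFindK rows j) (acc ++ [bGroup rows j (bFindK rows j)])
termination_by m => m
decreasing_by
  · omega
  · exact Nat.lt_succ_of_le (bFindK_le rows j)

def parse_worksheet_alt (lines : List String) : List (List (List String)) :=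
  let width := (lines.map (fun l => l.toList.length)).foldl max 0
  let rows := lines.map (fun l => bStrip l.toList)
  bScan rows width []

-- ===== PRECONDITION & SPEC =====
-- Pre_ excludes only the empty list, on which A raises ValueError (max() of an empty sequence).
def Pre_parse_worksheet (lines : List String) : Prop := lines ≠ []
instance (lines : List String) : Decidable (Pre_parse_worksheet lines) := by
  unfold Pre_parse_worksheet; infer_instance
def pvWitness_parse_worksheet : List String := ["ab c", "d  e"]
def Spec_parse_worksheet (lines : List String) (out : List (List (List String))) : Prop :=
  out = parse_worksheet_alt lines
instance (lines : List String) (out : List (List (List String))) :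
    Decidable (Spec_parse_worksheet lines out) := by unfold Spec_parse_worksheet; infer_instance

-- ===== CLAIM =====
def Claim_equal_parse_worksheet : Prop := ∀ (lines : List String), Dom_parse_worksheet lines →
  Pre_parse_worksheet lines → Spec_parse_worksheet lines (parse_worksheet lines)

-- ===== LEMMAS AND PROOFS =====
def pvIsSep (col : List String) : Bool := col.all (fun c => c == " ")

-- common description of both loops: groups of consecutive non-separator columns
def pvG (cur : List (List String)) (cols : List (List String)) : List (List (List String)) :=
  match cols with
  | [] => if cur.isEmpty then [] else [cur]
  | c :: cs =>
    if pvIsSep c then (if cur.isEmpty then pvG [] cs else cur :: pvG [] cs)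
    else pvG (cur ++ [c]) cs

theorem pvG_run (cols : List (List String)) (cur : List (List String)) (h : ¬ cur.isEmpty) :
    pvG cur cols = (cur ++ cols.takeWhile (fun col => !pvIsSep col)) ::
      pvG [] (cols.dropWhile (fun col => !pvIsSep col)) := by
  induction cols generalizing cur with
  | nil => simp [pvG, h]
  | cons c cs ih =>
    by_cases hs : pvIsSep c
    · simp [pvG, hs, h, List.takeWhile, List.dropWhile]
    · have hne : ¬ (cur ++ [c]).isEmpty = true := by simp
      rw [pvG, if_neg hs, ih _ hne]
      simp [List.takeWhile, List.dropWhile, hs]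

theorem pvFold_eq_pvG (cols : List (List String)) (p : List (List (List String)))
    (cur : List (List String)) :
    (if (cols.foldl pvStepA (p, cur)).2.isEmpty then (cols.foldl pvStepA (p, cur)).1
     else (cols.foldl pvStepA (p, cur)).1 ++ [(cols.foldl pvStepA (p, cur)).2]) =
    p ++ pvG cur cols := by
  induction cols generalizing p cur with
  | nil =>
    simp only [List.foldl_nil, pvG]
    by_cases h : cur.isEmpty <;> simp [h]
  | cons c cs ih =>
    simp only [List.foldl_cons]
    by_cases hs : pvIsSep c
    · have hs' : (c.all (fun ch => ch == " ")) = true := hs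
      by_cases hc : cur.isEmpty
      · rw [show pvStepA (p, cur) c = (p, cur) by simp [pvStepA, hs', hc]]
        rw [ih, pvG, if_pos hs, if_pos hc, List.isEmpty_iff.mp hc]
      · rw [show pvStepA (p, cur) c = (p ++ [cur], []) by simp [pvStepA, hs', hc]]
        rw [ih, pvG, if_pos hs, if_neg hc]
        simp
    · have hs' : (c.all (fun ch => ch == " ")) = false := by
        simpa [pvIsSep] using hs
      rw [show pvStepA (p, cur) c = (p, cur ++ [c]) by simp [pvStepA, hs']]
      rw [ih, pvG, if_neg hs]

-- ---- bridging A's materialised columns to B's on-demand columns ----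

theorem pvZipStar_eq_range (n : Nat) : ∀ (rows : List (List Char)), rows ≠ [] →
    (∀ r ∈ rows, r.length = n) →
    pvZipStar rows = (List.range n).map (fun j => rows.map (fun r => r.getD j ' ')) := by
  induction n with
  | zero =>
    intro rows hne hlen
    rw [pvZipStar]
    rw [dif_pos]
    · simp
    · right
      cases rows with
      | nil => exact absurd rfl hne
      | cons r rs =>
        simp only [List.any_cons, Bool.or_eq_true]
        left
        have := hlen r (List.mem_cons_self ..)
        simp [List.eq_nil_of_length_eq_zero this]
  | succ n ih =>
    intro rows hne hlen
    have hnoempty : rows.any List.isEmpty = false := by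
      rw [List.any_eq_false]
      intro r hr
      have := hlen r hr
      simp [List.isEmpty_iff]
      intro h
      rw [h] at this
      simp at this
    rw [pvZipStar, dif_neg (by simp [hne, hnoempty])]
    have htails : rows.map List.tail ≠ [] := by simpa using hne
    have hlentails : ∀ r ∈ rows.map List.tail, r.length = n := by
      intro r hr
      obtain ⟨s, hs, rfl⟩ := List.mem_map.mp hr
      have := hlen s hs
      simp [List.length_tail, this]
    rw [ih _ htails hlentails, List.range_succ_eq_map]
    simp only [List.map_cons, List.map_map]
    congr 1
    · apply List.map_congr_left
      intro r hr
      have := hlen r hr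
      cases r with
      | nil => simp at this
      | cons a as => simp [List.headI]
    · apply List.map_congr_left
      intro j _
      apply List.map_congr_left
      intro r hr
      have := hlen r hr
      cases r with
      | nil => simp at this
      | cons a as => simp [Function.comp]

theorem getD_pvLjust (s : List Char) (n j : Nat) :
    (pvLjust s n).getD j ' ' = s.getD j ' ' := by
  unfold pvLjust
  by_cases h : j < s.length
  · rw [List.getD_append _ _ _ _ h]
  · rw [Nat.not_lt] at h
    rw [List.getD_eq_getElem?_getD, List.getD_eq_getElem?_getD,
      List.getElem?_append_right h,
      show s[j]? = none from List.getElem?_eq_none (by omega),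
      List.getElem?_replicate]
    split <;> simp

theorem bCharAt_eq (r : List Char) (j : Nat) : bCharAt r j = pvCharStr (r.getD j ' ') := by
  unfold bCharAt pvCharStr
  by_cases h : j < r.length
  · rw [if_pos h]
  · rw [if_neg h]
    rw [Nat.not_lt] at h
    rw [List.getD_eq_getElem?_getD, List.getElem?_eq_none (by omega)]
    rfl

-- the column list B's index scan walks, as an explicit list (for the proofs only)
def colsList (rows : List (List Char)) (m : Nat) : List (List String) :=
  ((List.range m).map (bColumn rows)).reverse

theorem colsList_succ (rows : List (List Char)) (j : Nat) :
    colsList rows (j+1) = bColumn rows j :: colsList rows j := by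
  unfold colsList
  rw [List.range_succ]
  simp

theorem pvCols_eq_colsList (lines : List String) (hne : lines ≠ []) :
    pvCols lines = colsList (lines.map (fun l => bStrip l.toList))
      ((lines.map (fun l => l.toList.length)).foldl max 0) := by
  have hfoldmax : ∀ (xs : List Nat) (a : Nat), ∀ x ∈ xs, x ≤ xs.foldl max a := by
    intro xs
    induction xs with
    | nil => intro a x hx; simp at hx
    | cons y ys ih =>
      intro a x hx
      rcases List.mem_cons.mp hx with rfl | hx'
      · simp only [List.foldl_cons]
        calc x ≤ max a x := le_max_right _ _
        _ ≤ ys.foldl max (max a x) := by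
            clear ih hx
            induction ys generalizing a x with
            | nil => simp
            | cons z zs ih2 =>
              simp only [List.foldl_cons]
              calc max a x ≤ max (max a x) z := le_max_left _ _
              _ ≤ zs.foldl max (max (max a x) z) := ih2 _ _
      · exact ih _ x hx'
  show ((pvZipStar (lines.map (fun l => pvLjust (pvRstripNL l.toList)
      ((lines.map (fun l => l.toList.length)).foldl max 0)))).map
      (fun col => col.map pvCharStr)).reverse =
    ((List.range ((lines.map (fun l => l.toList.length)).foldl max 0)).map
      (bColumn (lines.map (fun l => bStrip l.toList)))).reverse
  set width := (lines.map (fun l => l.toList.length)).foldl max 0 with hw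
  have hlens : ∀ r ∈ lines.map (fun l => pvLjust (pvRstripNL l.toList) width),
      r.length = width := by
    intro r hr
    obtain ⟨l, hl, rfl⟩ := List.mem_map.mp hr
    have h1 : (pvRstripNL l.toList).length ≤ l.toList.length := by
      unfold pvRstripNL
      calc (l.toList.reverse.dropWhile (fun c => c = '\n')).reverse.length
          = (l.toList.reverse.dropWhile (fun c => c = '\n')).length := by rw [List.length_reverse]
        _ ≤ l.toList.reverse.length := List.length_dropWhile_le _ _
        _ = l.toList.length := List.length_reverse
    have h2 : l.toList.length ≤ width := by
      exact hfoldmax _ 0 _ (List.mem_map.mpr ⟨l, hl, rfl⟩)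
    unfold pvLjust
    simp only [List.length_append, List.length_replicate]
    omega
  have hrne : lines.map (fun l => pvLjust (pvRstripNL l.toList) width) ≠ [] := by
    simpa using hne
  rw [pvZipStar_eq_range width _ hrne hlens]
  congr 1
  simp only [List.map_map]
  apply List.map_congr_left
  intro j _
  unfold bColumn
  simp only [Function.comp, List.map_map]
  apply List.map_congr_left
  intro l _
  simp only [Function.comp]
  rw [bCharAt_eq, getD_pvLjust]
  rfl

theorem pvIsSep_bColumn (rows : List (List Char)) (j : Nat) :
    pvIsSep (bColumn rows j) = bIsSep rows j := by
  unfold pvIsSep bIsSep bColumn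
  rw [List.all_map]
  rfl

theorem dropWhile_colsList (rows : List (List Char)) (j : Nat) :
    (colsList rows j).dropWhile (fun c => !pvIsSep c) = colsList rows (bFindK rows j) := by
  induction j with
  | zero => simp [colsList, bFindK]
  | succ j ih =>
    by_cases hs : bIsSep rows j
    · have hk : bFindK rows (j+1) = j+1 := by rw [bFindK, if_pos hs]
      rw [colsList_succ, hk, List.dropWhile]
      simp only [pvIsSep_bColumn, hs, Bool.not_true]
      rw [colsList_succ]
    · have hk : bFindK rows (j+1) = bFindK rows j := by rw [bFindK, if_neg hs]
      rw [colsList_succ, hk, List.dropWhile]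
      simp only [pvIsSep_bColumn, hs, Bool.not_false]
      exact ih

theorem takeWhile_colsList (rows : List (List Char)) (j : Nat) :
    (colsList rows j).takeWhile (fun c => !pvIsSep c) =
      (PySem.List.pyRange ((j : Int) - 1) ((bFindK rows j : Int) - 1) (-1)).map
        (fun t => bColumn rows t.toNat) := by
  induction j with
  | zero =>
    rw [PySem.List.pyRange_neg_one_eq_nil (by simp [bFindK])]
    simp [colsList]
  | succ j ih =>
    have hcast : ((j+1 : Nat) : Int) - 1 = (j : Int) := by push_cast; ring
    by_cases hs : bIsSep rows j
    · have hk : bFindK rows (j+1) = j+1 := by rw [bFindK, if_pos hs]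
      rw [colsList_succ, hk, List.takeWhile, hcast]
      simp only [pvIsSep_bColumn, hs, Bool.not_true]
      rw [PySem.List.pyRange_neg_one_eq_nil (by omega)]
      simp
    · have hk : bFindK rows (j+1) = bFindK rows j := by rw [bFindK, if_neg hs]
      rw [colsList_succ, hk, List.takeWhile, hcast]
      simp only [pvIsSep_bColumn, hs, Bool.not_false]
      have hle : bFindK rows j ≤ j := bFindK_le rows j
      rw [PySem.List.pyRange_neg_one_cons (by omega), List.map_cons,
        Int.toNat_natCast, ih]

theorem bGroup_eq (rows : List (List Char)) (j : Nat) :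
    bGroup rows j (bFindK rows j) =
      bColumn rows j :: (colsList rows j).takeWhile (fun c => !pvIsSep c) := by
  unfold bGroup
  have hle : bFindK rows j ≤ j := bFindK_le rows j
  rw [PySem.List.pyRange_neg_one_cons (by omega), List.map_cons,
    Int.toNat_natCast, takeWhile_colsList]

theorem bScan_eq_pvG (rows : List (List Char)) :
    ∀ (m : Nat) (acc : List (List (List String))),
      bScan rows m acc = acc ++ pvG [] (colsList rows m) := by
  intro m
  induction m using Nat.strong_induction_on with
  | _ m ih =>
    intro acc
    match m with
    | 0 => simp [bScan, colsList, pvG]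
    | j+1 =>
      rw [colsList_succ, bScan]
      by_cases hs : bIsSep rows j
      · have hs' : pvIsSep (bColumn rows j) = true := by
          rw [pvIsSep_bColumn]; exact hs
        rw [if_pos hs, ih j (by omega)]
        conv_rhs => rw [pvG, if_pos hs']
        simp
      · have hs' : pvIsSep (bColumn rows j) = false := by
          rw [pvIsSep_bColumn]; simp [hs]
        rw [if_neg hs, ih (bFindK rows j) (Nat.lt_succ_of_le (bFindK_le rows j))]
        conv_rhs => rw [pvG, if_neg (by simp [hs'])]
        conv_rhs =>
          rw [show ([] : List (List String)) ++ [bColumn rows j] = [bColumn rows j] by simp]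
          rw [pvG_run _ _ (by simp)]
        rw [dropWhile_colsList, bGroup_eq]
        simp

-- ===== VERDICT =====
theorem parse_worksheet_spec : Claim_equal_parse_worksheet := by
  intro lines _ hpre
  show parse_worksheet lines = parse_worksheet_alt lines
  unfold parse_worksheet parse_worksheet_alt
  rw [bScan_eq_pvG]
  rw [pvCols_eq_colsList lines hpre]
  simpa using pvFold_eq_pvG
    (colsList (lines.map (fun l => bStrip l.toList))
      ((lines.map (fun l => l.toList.length)).foldl max 0)) [] []
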